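-- pv_equiv track=rewrite | github.com/soyjubilado/AdventOfCode | 2021/15/prog202115.py | GetGrid5
-- ===== SOURCE A (Python) =====
-- def GetGrid5(lines):
--   """Similar to GetGrid() but quintuple size for Part 2."""
--   grid = {}
--   for row in range(len(lines) * 5):
--     row_iteration = row // len(lines)
--     for col in range(len(lines[0] * 5)):
--       col_iteration = col // len(lines[0])
--       new_val = int(lines[row % len(lines)][col % len(lines[0])])
--       new_val = (new_val + row_iteration + col_iteration - 1) % 9 + 1
--       grid[(col, row)] = new_val
--   return grid
-- ===== SOURCE B (Python) =====
-- def GetGrid5(lines):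
--   """Similar to GetGrid() but quintuple size for Part 2."""
--   grid = {}
--   if not lines:
--     return grid
--   W = len(lines[0])
--   # one horizontal band: each base line expanded to 5 tiles by repeated +1-with-wrap
--   band = []
--   for line in lines:
--     tile = [(int(ch) - 1) % 9 + 1 for ch in line[:W]]
--     vals = []
--     for _ in range(5):
--       vals += tile
--       tile = [v % 9 + 1 for v in tile]
--     band.append(vals)
--   # stack 5 vertically shifted copies of the band
--   rows = []
--   for _ in range(5):
--     rows += band
--     band = [[v % 9 + 1 for v in row] for row in band]
--   for r, row in enumerate(rows):
--     for c, v in enumerate(row):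
--       grid[(c, r)] = v
--   return grid
-- ===== Notes on version B (the rewrite author's own statement) =====
-- stated objective: alternative
-- what changed: B builds the 5x grid compositionally: it parses each base line once into a normalized tile, expands it horizontally and then vertically by repeated wrap-increment (v % 9 + 1) of the previous band, and fills the dict row by row - replacing A's per-cell modular index arithmetic and per-cell int() re-parsing.
import Mathlib
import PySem

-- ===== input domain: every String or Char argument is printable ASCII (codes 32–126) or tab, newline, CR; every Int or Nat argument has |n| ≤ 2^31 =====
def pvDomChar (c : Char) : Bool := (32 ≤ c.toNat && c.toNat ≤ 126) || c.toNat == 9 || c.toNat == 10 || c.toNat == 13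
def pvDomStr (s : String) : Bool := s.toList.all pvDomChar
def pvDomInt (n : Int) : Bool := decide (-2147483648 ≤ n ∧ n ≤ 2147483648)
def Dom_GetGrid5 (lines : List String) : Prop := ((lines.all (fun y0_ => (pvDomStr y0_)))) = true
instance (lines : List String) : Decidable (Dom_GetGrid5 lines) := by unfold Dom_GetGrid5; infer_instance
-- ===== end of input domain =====

-- B builds the quintuple grid band by band, by repeated wrap-increment of the base tile (no per-cell
-- modular index arithmetic); same return value as A wherever A returns (objective: alternative).

-- ===== PORT A =====
def GetGrid5 (lines : List String) : List (Int × Int × Int) :=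
  let grid : PySem.Dict (Int × Int) Int := PySem.Dict.empty
  let grid :=
    (PySem.List.pyRange 0 (PySem.List.len lines * 5) 1).foldl
      (fun grid row =>
        let rowIteration := PySem.Int.floordiv row (PySem.List.len lines)
        -- len(lines[0] * 5): the length of the string lines[0] repeated 5 times
        (PySem.List.pyRange 0
            (PySem.List.len (PySem.List.pyRepeat ((PySem.List.pyGet? lines 0).getD "").toList 5)) 1).foldl
          (fun grid col =>
            let colIteration := PySem.Int.floordiv col (PySem.Str.len ((PySem.List.pyGet? lines 0).getD ""))
            -- int(lines[row % len(lines)][col % len(lines[0])]); the .getD defaults are unreachable under Pre_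
            let newVal :=
              (PySem.Int.ofChars?
                [(PySem.Str.pyGet?
                    ((PySem.List.pyGet? lines (PySem.Int.mod row (PySem.List.len lines))).getD "")
                    (PySem.Int.mod col (PySem.Str.len ((PySem.List.pyGet? lines 0).getD "")))).getD '0']).getD 0
            let newVal := PySem.Int.mod (newVal + rowIteration + colIteration - 1) 9 + 1
            grid.insert (col, row) newVal)
          grid)
      grid
  grid.items.map (fun p => (p.1.1, p.1.2, p.2))

-- ===== PORT B =====
def pvShift (v : Int) : Int := PySem.Int.mod v 9 + 1

-- 'vals = []; 5 times: vals += tile; tile = [f(v) for v in tile]'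
def pvExpand5 {α : Type} (f : α → α) (tile : List α) : List α :=
  ((PySem.List.pyRange 0 5 1).foldl (fun (st : List α × List α) _ => (st.1 ++ st.2, st.2.map f)) ([], tile)).1

def pvBaseTile (W : Int) (line : String) : List Int :=
  (PySem.Str.slice line none (some W)).toList.map
    (fun ch => PySem.Int.mod ((PySem.Int.ofChars? [ch]).getD 0 - 1) 9 + 1)

def GetGrid5_alt (lines : List String) : List (Int × Int × Int) :=
  match lines with
  | [] => []
  | l0 :: _ =>
    let W := PySem.Str.len l0
    let band := lines.map (fun line => pvExpand5 pvShift (pvBaseTile W line))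
    let rows := pvExpand5 (fun row => row.map pvShift) band
    let grid :=
      (PySem.List.enumerate rows).foldl
        (fun d rc => (PySem.List.enumerate rc.2).foldl (fun d cv => d.insert (cv.1, rc.1) cv.2) d)
        (PySem.Dict.empty : PySem.Dict (Int × Int) Int)
    grid.items.map (fun p => (p.1.1, p.1.2, p.2))

-- ===== PRECONDITION & SPEC =====
-- Pre_ excludes exactly the inputs where the Python A raises: a line shorter than lines[0]
-- (IndexError) or a non-digit among the first len(lines[0]) characters of some line (ValueError).
def Pre_GetGrid5 (lines : List String) : Prop :=
  ∀ line ∈ lines, (lines.headD "").toList.length ≤ line.toList.length ∧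
    ((line.toList.take (lines.headD "").toList.length).all Char.isDigit) = true
instance (lines : List String) : Decidable (Pre_GetGrid5 lines) := by unfold Pre_GetGrid5; infer_instance

def pvWitness_GetGrid5 : List String := ["12", "34"]

def Spec_GetGrid5 (lines : List String) (out : List (Int × Int × Int)) : Prop := out = GetGrid5_alt lines
instance (lines : List String) (out : List (Int × Int × Int)) : Decidable (Spec_GetGrid5 lines out) := by
  unfold Spec_GetGrid5; infer_instance

-- ===== CLAIM (what is proved, stated in full; the proofs are below) =====
def Claim_equal_GetGrid5 : Prop :=
  ∀ (lines : List String), Dom_GetGrid5 lines → Pre_GetGrid5 lines → Spec_GetGrid5 lines (GetGrid5 lines)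

-- ===== LEMMAS AND PROOFS =====

-- generic: a row-major double insert loop over fresh keys appends row blocks
theorem pv_items_double_fold {α β : Type} (l : List α) (k1 : α → Int) (m : α → List β)
    (k2 : α → β → Int) (v : α → β → Int) (d : PySem.Dict (Int × Int) Int)
    (hl : (l.map k1).Nodup) (hm : ∀ a, ((m a).map (k2 a)).Nodup)
    (hd : ∀ p ∈ d.items, ∀ a ∈ l, p.1.2 ≠ k1 a) :
    (l.foldl (fun d a => (m a).foldl (fun d b => d.insert (k2 a b, k1 a) (v a b)) d) d).items
      = d.items ++ l.flatMap (fun a => (m a).map (fun b => ((k2 a b, k1 a), v a b))) := by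
  induction l generalizing d with
  | nil => simp
  | cons a l ih =>
      simp only [List.foldl_cons, List.flatMap_cons]
      have hfresh : ∀ b ∈ m a, d.contains (k2 a b, k1 a) = false := by
        intro b hb
        by_contra hcon
        have hc : d.contains (k2 a b, k1 a) = true := by
          cases hcontains : d.contains (k2 a b, k1 a) <;> simp_all
        rw [PySem.Dict.contains_iff_mem_keys] at hc
        have : (k2 a b, k1 a) ∈ d.items.map (·.1) := hc
        rcases List.mem_map.mp this with ⟨p, hp, hpe⟩
        exact hd p hp a (List.mem_cons_self) (by rw [hpe])
      have hnodup : ((m a).map (fun b => ((k2 a b, k1 a) : Int × Int))).Nodup := by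
        rw [show (fun b => ((k2 a b, k1 a) : Int × Int)) = (fun x => (x, k1 a)) ∘ (k2 a) from rfl,
          ← List.map_map]
        exact (hm a).map (fun x y hxy => (Prod.ext_iff.mp hxy).1)
      have hinner := PySem.Dict.items_foldl_insert_fresh (m a)
        (fun b => ((k2 a b, k1 a) : Int × Int)) (fun b => v a b) d hfresh hnodup
      rw [ih _ (by simpa using hl.of_cons) ?_, hinner, List.append_assoc]
      intro p hp a' ha'
      rw [hinner] at hp
      rcases List.mem_append.mp hp with hp | hp
      · exact hd p hp a' (List.mem_cons_of_mem _ ha')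
      · rcases List.mem_map.mp hp with ⟨b, hb, rfl⟩
        simp only [List.map_cons, List.nodup_cons, List.mem_map] at hl
        intro he
        exact hl.1 ⟨a', ha', he.symm⟩

theorem pv_expand5_eq {α : Type} (f : α → α) (t : List α) :
    pvExpand5 f t = (List.range 5).flatMap (fun k => t.map (f^[k])) := by
  have h5 : PySem.List.pyRange 0 5 1 = [0,1,2,3,4] := by decide
  simp [pvExpand5, h5, List.foldl, List.range_succ, List.map_map, Function.comp_def,
    Function.iterate_succ, Function.iterate_zero]

theorem pv_flat_len {α : Type} (f : α → α) (t : List α) (m : Nat) :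
    ((List.range m).flatMap (fun k => t.map (f^[k]))).length = m * t.length := by
  induction m with
  | zero => simp
  | succ m ih =>
      simp only [List.range_succ, List.flatMap_append, List.length_append, ih,
        List.flatMap_cons, List.flatMap_nil, List.append_nil, List.length_map]
      ring

theorem pv_expand5_len {α : Type} (f : α → α) (t : List α) :
    (pvExpand5 f t).length = 5 * t.length := by
  rw [pv_expand5_eq]; exact pv_flat_len f t 5

theorem pv_flat_getElem {α : Type} (f : α → α) (t : List α) (m i : Nat)
    (h : i < m * t.length) :
    ((List.range m).flatMap (fun k => t.map (f^[k])))[i]? = (t[i % t.length]?).map (f^[i / t.length]) := by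
  induction m with
  | zero => omega
  | succ m ih =>
      have hmul : (m + 1) * t.length = m * t.length + t.length := by ring
      have hlen := pv_flat_len f t m
      rw [List.range_succ, List.flatMap_append]
      by_cases hc : i < m * t.length
      · rw [List.getElem?_append_left (by omega), ih hc]
      · have hn : 0 < t.length := by
          by_contra h0
          have h0' : t.length = 0 := by omega
          rw [h0', Nat.mul_zero] at h; omega
        rw [List.getElem?_append_right (hlen.le.trans (Nat.le_of_not_lt hc))]
        simp only [hlen, List.flatMap_cons, List.flatMap_nil, List.append_nil]
        have h1 : i / t.length = m := Nat.div_eq_of_lt_le (by omega) (by omega)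
        have h2 : i % t.length = i - m * t.length := by
          rw [← h1, Nat.mod_eq_sub_mul_div, Nat.mul_comm]
        rw [List.getElem?_map, h1, ← h2]

theorem pv_expand5_getElem {α : Type} (f : α → α) (t : List α) (i : Nat)
    (h : i < 5 * t.length) :
    (pvExpand5 f t)[i]? = (t[i % t.length]?).map (f^[i / t.length]) := by
  rw [pv_expand5_eq]; exact pv_flat_getElem f t 5 i h

theorem pv_map_iterate {α : Type} (f : α → α) (k : Nat) (l : List α) :
    (List.map f)^[k] l = l.map (f^[k]) := by
  induction k generalizing l with
  | zero => simp
  | succ k ih =>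
      rw [Function.iterate_succ_apply, ih, List.map_map, ← Function.iterate_succ]

theorem pv_shift_iter (k : Nat) (d : Int) :
    pvShift^[k] (PySem.Int.mod (d - 1) 9 + 1) = PySem.Int.mod (d + k - 1) 9 + 1 := by
  induction k with
  | zero => simp
  | succ k ih =>
      rw [Function.iterate_succ_apply', ih]
      simp only [pvShift, PySem.Int.mod_eq_emod_of_pos (by omega : (0:Int) < 9)]
      push_cast
      omega

-- A's inner cell value, as written in the port
def pvA_val (lines : List String) (row col : Int) : Int :=
  PySem.Int.mod
    ((PySem.Int.ofChars?
        [(PySem.Str.pyGet?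
            ((PySem.List.pyGet? lines (PySem.Int.mod row (PySem.List.len lines))).getD "")
            (PySem.Int.mod col (PySem.Str.len ((PySem.List.pyGet? lines 0).getD "")))).getD '0']).getD 0
      + PySem.Int.floordiv row (PySem.List.len lines)
      + PySem.Int.floordiv col (PySem.Str.len ((PySem.List.pyGet? lines 0).getD ""))
      - 1) 9 + 1

theorem pvA_items (lines : List String) :
    GetGrid5 lines
      = ((PySem.List.pyRange 0 (PySem.List.len lines * 5) 1).flatMap
          (fun r =>
            (PySem.List.pyRange 0
                (PySem.List.len (PySem.List.pyRepeat ((PySem.List.pyGet? lines 0).getD "").toList 5)) 1).map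
              (fun c => ((c, r), pvA_val lines r c)))).map (fun p => (p.1.1, p.1.2, p.2)) := by
  have h := pv_items_double_fold
    (PySem.List.pyRange 0 (PySem.List.len lines * 5) 1) (fun r => r)
    (fun _ => PySem.List.pyRange 0
      (PySem.List.len (PySem.List.pyRepeat ((PySem.List.pyGet? lines 0).getD "").toList 5)) 1)
    (fun _ c => c) (fun r c => pvA_val lines r c) PySem.Dict.empty
    (by simpa using PySem.List.nodup_pyRange_one _ _)
    (fun _ => by simpa using PySem.List.nodup_pyRange_one _ _)
    (by intro p hp; cases hp)
  rw [show (PySem.Dict.empty : PySem.Dict (Int × Int) Int).items = [] from rfl,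
    List.nil_append] at h
  show (_ : PySem.Dict (Int × Int) Int).items.map _ = _
  exact congrArg (List.map _) h

theorem pvB_items (rows : List (List Int)) :
    ((PySem.List.enumerate rows).foldl
        (fun d rc => (PySem.List.enumerate rc.2).foldl (fun d cv => d.insert (cv.1, rc.1) cv.2) d)
        (PySem.Dict.empty : PySem.Dict (Int × Int) Int)).items
      = (PySem.List.enumerate rows).flatMap
          (fun rc => (PySem.List.enumerate rc.2).map (fun cv => ((cv.1, rc.1), cv.2))) := by
  have h := pv_items_double_fold (PySem.List.enumerate rows) (fun rc => rc.1)
    (fun rc => PySem.List.enumerate rc.2) (fun _ cv => cv.1) (fun _ cv => cv.2) PySem.Dict.empty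
    (by rw [PySem.List.map_fst_enumerate]; exact PySem.List.nodup_pyRange_one _ _)
    (fun rc => by rw [PySem.List.map_fst_enumerate]; exact PySem.List.nodup_pyRange_one _ _)
    (by intro p hp; cases hp)
  rw [show (PySem.Dict.empty : PySem.Dict (Int × Int) Int).items = [] from rfl,
    List.nil_append] at h
  exact h

-- the core cell identity: B's incrementally shifted band agrees with A's modular formula
theorem pv_cell (l0 : String) (rest : List String)
    (hPre : Pre_GetGrid5 (l0 :: rest)) (rn cn : Nat)
    (hr : rn < 5 * (l0 :: rest).length) (hc : cn < 5 * l0.toList.length) :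
    pvA_val (l0 :: rest) ((rn : Nat) : Int) ((cn : Nat) : Int)
      = PySem.List.pyGetD
          (PySem.List.pyGetD
            (pvExpand5 (fun row => row.map pvShift)
              ((l0 :: rest).map (fun line => pvExpand5 pvShift (pvBaseTile (PySem.Str.len l0) line))))
            ((rn : Nat) : Int) [])
          ((cn : Nat) : Int) 0 := by
  have hH0 : 0 < (l0 :: rest).length := by simp
  have hW0 : 0 < l0.toList.length := by omega
  have hj : rn % (l0 :: rest).length < (l0 :: rest).length := Nat.mod_lt _ hH0
  have hi : cn % l0.toList.length < l0.toList.length := Nat.mod_lt _ hW0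
  have hmem : (l0 :: rest)[rn % (l0 :: rest).length]'hj ∈ l0 :: rest := List.getElem_mem hj
  have hlenline : l0.toList.length
      ≤ ((l0 :: rest)[rn % (l0 :: rest).length]'hj).toList.length := by
    have := (hPre _ hmem).1
    simpa using this
  have hil : cn % l0.toList.length
      < ((l0 :: rest)[rn % (l0 :: rest).length]'hj).toList.length := lt_of_lt_of_le hi hlenline
  have hs : (PySem.Str.slice ((l0 :: rest)[rn % (l0 :: rest).length]'hj) none
        (some (PySem.Str.len l0))).toList
      = ((l0 :: rest)[rn % (l0 :: rest).length]'hj).toList.take l0.toList.length := by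
    simp [PySem.Str.slice, PySem.Str.len_eq]
  have htl : (pvBaseTile (PySem.Str.len l0) ((l0 :: rest)[rn % (l0 :: rest).length]'hj)).length
      = l0.toList.length := by
    simp only [pvBaseTile, List.length_map, hs, List.length_take]
    omega
  have htile : (pvBaseTile (PySem.Str.len l0) ((l0 :: rest)[rn % (l0 :: rest).length]'hj))[cn % l0.toList.length]?
      = some (PySem.Int.mod
          ((PySem.Int.ofChars?
            [((l0 :: rest)[rn % (l0 :: rest).length]'hj).toList[cn % l0.toList.length]'hil]).getD 0 - 1) 9 + 1) := by
    simp only [pvBaseTile, hs, List.getElem?_map]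
    rw [List.getElem?_take_of_lt hi, List.getElem?_eq_getElem hil]
    simp
  -- reduce B's nested lookups
  have hrow : PySem.List.pyGetD
      (pvExpand5 (fun row => row.map pvShift)
        ((l0 :: rest).map (fun line => pvExpand5 pvShift (pvBaseTile (PySem.Str.len l0) line))))
      ((rn : Nat) : Int) []
      = (pvExpand5 pvShift (pvBaseTile (PySem.Str.len l0)
          ((l0 :: rest)[rn % (l0 :: rest).length]'hj))).map (pvShift^[rn / (l0 :: rest).length]) := by
    rw [PySem.List.pyGetD_natCast, List.getD_eq_getElem?_getD,
      pv_expand5_getElem _ _ rn (by simpa using hr)]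
    simp only [List.length_map, List.getElem?_map, List.getElem?_eq_getElem hj,
      Option.map_some, Option.getD_some]
    rw [pv_map_iterate]
  rw [hrow, PySem.List.pyGetD_natCast, List.getD_eq_getElem?_getD, List.getElem?_map,
    pv_expand5_getElem _ _ cn (by rw [htl]; exact hc), htl, htile]
  simp only [Option.map_some, Option.getD_some]
  rw [← Function.iterate_add_apply, pv_shift_iter]
  -- reduce A's modular lookups to the same character
  simp only [pvA_val]
  rw [PySem.List.pyGet?_zero_cons]
  simp only [Option.getD_some]
  rw [PySem.List.len_eq, PySem.Str.len_eq]
  rw [PySem.Int.mod_natCast rn, PySem.Int.mod_natCast cn,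
    PySem.Int.floordiv_natCast rn, PySem.Int.floordiv_natCast cn]
  rw [PySem.List.pyGet?_natCast, List.getElem?_eq_getElem hj]
  simp only [Option.getD_some]
  rw [PySem.Str.pyGet?_natCast, List.getElem?_eq_getElem hil]
  simp only [Option.getD_some]
  rw [Nat.cast_add, ← add_assoc]

-- ===== VERDICT =====
theorem GetGrid5_spec : Claim_equal_GetGrid5 := by
  intro lines _ hPre
  unfold Spec_GetGrid5
  cases lines with
  | nil => rfl
  | cons l0 rest =>
    -- shared dimensions
    have hH0 : 0 < (l0 :: rest).length := by simp
    have hrep : PySem.List.len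
        (PySem.List.pyRepeat ((PySem.List.pyGet? (l0 :: rest) 0).getD "").toList 5)
        = ((5 * l0.toList.length : Nat) : Int) := by
      simp [PySem.List.len_eq, PySem.List.pyRepeat]
      ring
    have houter : PySem.List.len (l0 :: rest) * 5 = (((5 * (l0 :: rest).length : Nat)) : Int) := by
      simp [PySem.List.len_eq]; ring
    -- tile and band lengths
    have htilelen : ∀ line ∈ l0 :: rest, (pvBaseTile (PySem.Str.len l0) line).length
        = l0.toList.length := by
      intro line hl
      have h1 := (hPre line hl).1
      have hs : (PySem.Str.slice line none (some (PySem.Str.len l0))).toList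
          = line.toList.take l0.toList.length := by
        simp [PySem.Str.slice, PySem.Str.len_eq]
      simp only [List.headD_cons] at h1
      simp only [pvBaseTile, List.length_map, hs, List.length_take]
      omega
    have hbandlen : ((l0 :: rest).map
        (fun line => pvExpand5 pvShift (pvBaseTile (PySem.Str.len l0) line))).length
        = (l0 :: rest).length := by simp
    have hrowslen : (pvExpand5 (fun row => row.map pvShift)
        ((l0 :: rest).map (fun line => pvExpand5 pvShift (pvBaseTile (PySem.Str.len l0) line)))).length
        = 5 * (l0 :: rest).length := by
      rw [pv_expand5_len, hbandlen]
    -- both programs, as flat item lists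
    rw [pvA_items]
    show _ = (_ : PySem.Dict (Int × Int) Int).items.map (fun p => (p.1.1, p.1.2, p.2))
    rw [pvB_items]
    apply congrArg (List.map _)
    rw [houter, hrep]
    simp only [PySem.List.pyRange_zero_natCast]
    rw [List.flatMap_map]
    rw [PySem.List.enumerate_eq_map_pyRange _ ([] : List Int), PySem.List.len_eq, hrowslen]
    simp only [PySem.List.pyRange_zero_natCast]
    rw [List.map_map, List.flatMap_map]
    apply List.flatMap_congr
    intro rn hrn
    rw [List.mem_range] at hrn
    -- the row of B at index rn
    have hrowlen : (PySem.List.pyGetD (pvExpand5 (fun row => row.map pvShift)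
        ((l0 :: rest).map (fun line => pvExpand5 pvShift (pvBaseTile (PySem.Str.len l0) line))))
        ((rn : Nat) : Int) []).length = 5 * l0.toList.length := by
      rw [PySem.List.pyGetD_natCast, List.getD_eq_getElem?_getD,
        pv_expand5_getElem _ _ rn (by rw [hbandlen]; omega), hbandlen]
      have hj : rn % (l0 :: rest).length < (l0 :: rest).length := Nat.mod_lt _ hH0
      rw [List.getElem?_map, (List.getElem?_eq_getElem hj)]
      simp only [Option.map_some, Option.getD_some]
      rw [pv_map_iterate]
      simp only [List.length_map, pv_expand5_len]
      rw [htilelen _ (List.getElem_mem hj)]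
    simp only [Function.comp_apply]
    rw [PySem.List.enumerate_eq_map_pyRange _ (0 : Int), PySem.List.len_eq, hrowlen,
      PySem.List.pyRange_zero_natCast, List.map_map, List.map_map]
    rw [List.map_map]
    apply List.map_congr_left
    intro cn hcn
    rw [List.mem_range] at hcn
    simp only [Function.comp_apply]
    rw [pv_cell l0 rest hPre rn cn hrn hcn]
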